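-- pv_equiv track=rewrite | github.com/AlinaSas/Road-damage-segmentation | components/Defect_area.py | get_triangles
-- ===== SOURCE A (Python) =====
-- def get_triangles(coord_road):
--     """Определяются координаты двух прямоугольных треугольников. ABC - правый треугольник, гипотенуза(AB)
--      которого совпадает с правой границей дороги. Координата точки A - точка границы дороги с ординатой 800,
--      точка B - точка границы дороги с ординатой, соответсвующей последней попадающей в кадр точке границы дороги,
--      точка C - вершина прямоугольного треугольника с гипотенузой AB.
--      Треугольник ZYW строится аналогиным образом с левой стороны."""
--
--     BCy, Ay = 352, 352
--     YWy, Zy = 352, 352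
--     for i in range(len(coord_road)):
--         if coord_road[i][1] == 1214:
--             if coord_road[i][0] < BCy:
--                 BCy = coord_road[i][0]
--
--         if coord_road[i][1] == 800:
--             if coord_road[i][0] < Ay:
--                 Ay = coord_road[i][0]
--
--         if coord_road[i][1] == 1:
--             if coord_road[i][0] < YWy:
--                 YWy = coord_road[i][0]
--
--         if coord_road[i][1] == 400:
--             if coord_road[i][0] < Zy:
--                 Zy = coord_road[i][0]
--
--     A, B, C = [800, Ay], [1214, BCy], [800, BCy]
--     Z, Y, W = [400, Zy], [0, YWy], [400, YWy]
--     return [A, B, C], [Z, Y, W]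
-- ===== SOURCE B (Python) =====
-- def get_triangles(coord_road):
--     def min_x(y):
--         return min([352, *(p[0] for p in coord_road if p[1] == y)])
--     BCy, Ay = min_x(1214), min_x(800)
--     YWy, Zy = min_x(1), min_x(400)
--     return [[800, Ay], [1214, BCy], [800, BCy]], [[400, Zy], [0, YWy], [400, YWy]]
-- ===== Notes on version B (the rewrite author's own statement) =====
-- stated objective: idiomatic
-- what changed: Replaces the single index-based loop that threads four mutable minima with four independent filtered min computations (one targeted scan per y-value, each seeded with the 352 baseline).
import Mathlib
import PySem

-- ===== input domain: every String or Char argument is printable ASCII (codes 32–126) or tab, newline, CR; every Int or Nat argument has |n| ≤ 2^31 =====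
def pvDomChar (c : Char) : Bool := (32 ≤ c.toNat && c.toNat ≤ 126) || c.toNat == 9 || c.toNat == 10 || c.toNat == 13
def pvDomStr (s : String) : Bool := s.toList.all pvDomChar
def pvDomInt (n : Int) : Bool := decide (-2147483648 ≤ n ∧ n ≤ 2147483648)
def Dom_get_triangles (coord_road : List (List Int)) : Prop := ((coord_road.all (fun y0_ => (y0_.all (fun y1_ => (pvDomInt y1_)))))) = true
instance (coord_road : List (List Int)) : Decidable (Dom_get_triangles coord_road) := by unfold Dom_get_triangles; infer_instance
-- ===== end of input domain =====

-- B replaces the single four-accumulator index loop by four independent filtered min scans (idiomatic decomposition).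

-- ===== PORT A =====
-- the body of A's for-loop: read coord_road[i] and conditionally update each of (BCy, Ay, YWy, Zy)
def pvStepA (coord_road : List (List Int)) (s : Int × Int × Int × Int) (i : Int) : Int × Int × Int × Int :=
  let p := PySem.List.pyGetD coord_road i []
  (if PySem.List.pyGetD p 1 0 = 1214 ∧ PySem.List.pyGetD p 0 0 < s.1 then PySem.List.pyGetD p 0 0 else s.1,
   if PySem.List.pyGetD p 1 0 = 800 ∧ PySem.List.pyGetD p 0 0 < s.2.1 then PySem.List.pyGetD p 0 0 else s.2.1,
   if PySem.List.pyGetD p 1 0 = 1 ∧ PySem.List.pyGetD p 0 0 < s.2.2.1 then PySem.List.pyGetD p 0 0 else s.2.2.1,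
   if PySem.List.pyGetD p 1 0 = 400 ∧ PySem.List.pyGetD p 0 0 < s.2.2.2 then PySem.List.pyGetD p 0 0 else s.2.2.2)

-- literal transliteration of A: for i in range(len(coord_road)) threading the four minima
def get_triangles (coord_road : List (List Int)) : List (List Int) × List (List Int) :=
  let st := (PySem.List.pyRange 0 (coord_road.length) 1).foldl (pvStepA coord_road) (352, 352, 352, 352)
  ([[800, st.2.1], [1214, st.1], [800, st.1]], [[400, st.2.2.2], [0, st.2.2.1], [400, st.2.2.1]])

-- ===== PORT B =====
-- min([352, *(p[0] for p in coord_road if p[1] == y)])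
def minXAt (coord_road : List (List Int)) (y : Int) : Int :=
  ((coord_road.filter (fun p => PySem.List.pyGetD p 1 0 == y)).map
    (fun p => PySem.List.pyGetD p 0 0)).foldl min 352

def get_triangles_alt (coord_road : List (List Int)) : List (List Int) × List (List Int) :=
  let BCy := minXAt coord_road 1214
  let Ay  := minXAt coord_road 800
  let YWy := minXAt coord_road 1
  let Zy  := minXAt coord_road 400
  ([[800, Ay], [1214, BCy], [800, BCy]], [[400, Zy], [0, YWy], [400, YWy]])

-- ===== PRECONDITION & SPEC =====
-- Pre_ excludes exactly the inputs where Python A raises IndexError: a point with fewer than 2 coordinates.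
def Pre_get_triangles (coord_road : List (List Int)) : Prop :=
  ∀ p ∈ coord_road, 2 ≤ p.length
instance (coord_road : List (List Int)) : Decidable (Pre_get_triangles coord_road) := by
  unfold Pre_get_triangles; infer_instance

def pvWitness_get_triangles : List (List Int) := [[100, 800], [50, 1214], [7, 1]]

def Spec_get_triangles (coord_road : List (List Int)) (out : List (List Int) × List (List Int)) : Prop := out = get_triangles_alt coord_road
instance (coord_road : List (List Int)) (out : List (List Int) × List (List Int)) : Decidable (Spec_get_triangles coord_road out) := by unfold Spec_get_triangles; infer_instance

-- ===== CLAIM (what is proved, stated in full; the proofs are below) =====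
def Claim_equal_get_triangles : Prop := ∀ (coord_road : List (List Int)), Dom_get_triangles coord_road → Pre_get_triangles coord_road → Spec_get_triangles coord_road (get_triangles coord_road)

-- ===== LEMMAS AND PROOFS =====

-- A's loop body viewed on the point itself rather than its index
def pvStepP (s : Int × Int × Int × Int) (p : List Int) : Int × Int × Int × Int :=
  (if PySem.List.pyGetD p 1 0 = 1214 ∧ PySem.List.pyGetD p 0 0 < s.1 then PySem.List.pyGetD p 0 0 else s.1,
   if PySem.List.pyGetD p 1 0 = 800 ∧ PySem.List.pyGetD p 0 0 < s.2.1 then PySem.List.pyGetD p 0 0 else s.2.1,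
   if PySem.List.pyGetD p 1 0 = 1 ∧ PySem.List.pyGetD p 0 0 < s.2.2.1 then PySem.List.pyGetD p 0 0 else s.2.2.1,
   if PySem.List.pyGetD p 1 0 = 400 ∧ PySem.List.pyGetD p 0 0 < s.2.2.2 then PySem.List.pyGetD p 0 0 else s.2.2.2)

-- one component: A's conditional update scanned over a list equals B's filtered min fold
lemma fold_min_filter (y : Int) :
    ∀ (xs : List (List Int)) (m : Int),
      xs.foldl (fun m p => if PySem.List.pyGetD p 1 0 = y ∧ PySem.List.pyGetD p 0 0 < m
                           then PySem.List.pyGetD p 0 0 else m) m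
      = ((xs.filter (fun p => PySem.List.pyGetD p 1 0 == y)).map
          (fun p => PySem.List.pyGetD p 0 0)).foldl min m := by
  intro xs
  induction xs with
  | nil => intro m; rfl
  | cons p xs ih =>
    intro m
    by_cases h : PySem.List.pyGetD p 1 0 = y
    · simp only [List.foldl_cons, List.filter_cons, h, beq_self_eq_true, if_pos,
        List.map_cons, List.foldl_cons, ih]
      congr 1
      simp only [true_and]
      by_cases h2 : PySem.List.pyGetD p 0 0 < m
      · rw [if_pos h2, min_eq_right (le_of_lt h2)]
      · rw [if_neg h2, min_eq_left (by omega)]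
    · simp only [List.foldl_cons, List.filter_cons, h, false_and, if_false,
        beq_iff_eq, ih]

-- the combined four-accumulator fold is the 4-tuple of the independent folds
lemma fold_combined :
    ∀ (xs : List (List Int)) (b a w z : Int),
      xs.foldl pvStepP (b, a, w, z)
      = (xs.foldl (fun m p => if PySem.List.pyGetD p 1 0 = 1214 ∧ PySem.List.pyGetD p 0 0 < m then PySem.List.pyGetD p 0 0 else m) b,
         xs.foldl (fun m p => if PySem.List.pyGetD p 1 0 = 800 ∧ PySem.List.pyGetD p 0 0 < m then PySem.List.pyGetD p 0 0 else m) a,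
         xs.foldl (fun m p => if PySem.List.pyGetD p 1 0 = 1 ∧ PySem.List.pyGetD p 0 0 < m then PySem.List.pyGetD p 0 0 else m) w,
         xs.foldl (fun m p => if PySem.List.pyGetD p 1 0 = 400 ∧ PySem.List.pyGetD p 0 0 < m then PySem.List.pyGetD p 0 0 else m) z) := by
  intro xs
  induction xs with
  | nil => intro b a w z; rfl
  | cons p xs ih => intro b a w z; simp only [List.foldl_cons, pvStepP, ih]

-- the index loop over range(len(xs)) is the structural fold over xs
lemma foldl_range_index {β : Type} (xs : List (List Int)) (g : β → List Int → β) (init : β) :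
    (PySem.List.pyRange 0 (xs.length) 1).foldl
      (fun s i => g s (PySem.List.pyGetD xs i [])) init
    = xs.foldl g init := by
  have h := PySem.List.map_pyGetD_pyRange_zero (xs := xs) (d := ([] : List Int))
  simp only [PySem.List.len] at h
  calc (PySem.List.pyRange 0 (xs.length) 1).foldl (fun s i => g s (PySem.List.pyGetD xs i [])) init
      = ((PySem.List.pyRange 0 (xs.length) 1).map (fun i => PySem.List.pyGetD xs i [])).foldl g init := by
        rw [List.foldl_map]
    _ = xs.foldl g init := by rw [h]

lemma key_fold (c : List (List Int)) :
    (PySem.List.pyRange 0 (c.length) 1).foldl (pvStepA c) (352, 352, 352, 352)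
      = (minXAt c 1214, minXAt c 800, minXAt c 1, minXAt c 400) := by
  have h1 : (PySem.List.pyRange 0 (c.length) 1).foldl (pvStepA c) (352, 352, 352, 352)
      = c.foldl pvStepP (352, 352, 352, 352) :=
    foldl_range_index c pvStepP (352, 352, 352, 352)
  rw [h1, fold_combined, fold_min_filter 1214, fold_min_filter 800,
      fold_min_filter 1, fold_min_filter 400]
  rfl

-- ===== VERDICT (by name: the statement is the Claim_ definition above) =====
theorem get_triangles_spec : Claim_equal_get_triangles := by
  intro coord_road _ _
  show get_triangles coord_road = get_triangles_alt coord_road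
  simp only [get_triangles, get_triangles_alt, key_fold]
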